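-- pv_equiv track=rewrite | github.com/FatmaLajmi/ML_Website | salary_feature_engineering_solution.py | create_technology_features
-- ===== SOURCE A (Python) =====
-- def create_technology_features(skills_text):
--     """
--     Categorize skills into technology groups
--     """
--     skills_lower = (skills_text or '').lower()
--
--     big_data_keywords = ['hadoop', 'spark', 'kafka', 'airflow', 'databricks', 'hive']
--     ml_keywords = ['tensorflow', 'pytorch', 'keras', 'scikit', 'sklearn', 'xgboost']
--     db_keywords = ['sql', 'postgres', 'mysql', 'oracle', 'mongodb', 'cassandra', 'redis']
--     programming_keywords = ['python', 'java', 'scala', 'r', 'go', 'rust', 'javascript']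
--     bi_keywords = ['tableau', 'power_bi', 'looker', 'qlik', 'cognos', 'microstrategy']
--     cloud_keywords = ['aws', 'azure', 'gcp', 'cloud']
--
--     return {
--         'has_bigdata': 1 if any(kw in skills_lower for kw in big_data_keywords) else 0,
--         'has_ml_lib': 1 if any(kw in skills_lower for kw in ml_keywords) else 0,
--         'has_db': 1 if any(kw in skills_lower for kw in db_keywords) else 0,
--         'has_programming': 1 if any(kw in skills_lower for kw in programming_keywords) else 0,
--         'has_bi_tool': 1 if any(kw in skills_lower for kw in bi_keywords) else 0,
--         'has_cloud': 1 if any(kw in skills_lower for kw in cloud_keywords) else 0,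
--     }
-- ===== SOURCE B (Python) =====
-- # Text-major single scan: walk the text once, prefix-match keywords at each
-- # position (naive multi-pattern matching), collect matched flags in a set.
-- KEYWORDS = [
--     ('hadoop', 'has_bigdata'), ('spark', 'has_bigdata'), ('kafka', 'has_bigdata'),
--     ('airflow', 'has_bigdata'), ('databricks', 'has_bigdata'), ('hive', 'has_bigdata'),
--     ('tensorflow', 'has_ml_lib'), ('pytorch', 'has_ml_lib'), ('keras', 'has_ml_lib'),
--     ('scikit', 'has_ml_lib'), ('sklearn', 'has_ml_lib'), ('xgboost', 'has_ml_lib'),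
--     ('sql', 'has_db'), ('postgres', 'has_db'), ('mysql', 'has_db'), ('oracle', 'has_db'),
--     ('mongodb', 'has_db'), ('cassandra', 'has_db'), ('redis', 'has_db'),
--     ('python', 'has_programming'), ('java', 'has_programming'), ('scala', 'has_programming'),
--     ('r', 'has_programming'), ('go', 'has_programming'), ('rust', 'has_programming'),
--     ('javascript', 'has_programming'),
--     ('tableau', 'has_bi_tool'), ('power_bi', 'has_bi_tool'), ('looker', 'has_bi_tool'),
--     ('qlik', 'has_bi_tool'), ('cognos', 'has_bi_tool'), ('microstrategy', 'has_bi_tool'),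
--     ('aws', 'has_cloud'), ('azure', 'has_cloud'), ('gcp', 'has_cloud'), ('cloud', 'has_cloud'),
-- ]
--
-- FLAGS = ['has_bigdata', 'has_ml_lib', 'has_db', 'has_programming', 'has_bi_tool', 'has_cloud']
--
--
-- def create_technology_features(skills_text):
--     """Categorize skills into technology groups (single left-to-right text scan)."""
--     s = (skills_text or '').lower()
--     matched = set()
--     for i in range(len(s)):
--         for kw, flag in KEYWORDS:
--             if s.startswith(kw, i):
--                 matched.add(flag)
--     return {flag: (1 if flag in matched else 0) for flag in FLAGS}
-- ===== Notes on version B (the rewrite author's own statement) =====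
-- stated objective: alternative
-- what changed: Replaces A's six independent any(kw in s) substring scans with a single left-to-right scan over the text that prefix-matches all keywords at each position (naive multi-pattern matching), accumulating matched flags in a set and emitting the six flags from it.
import Mathlib
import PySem

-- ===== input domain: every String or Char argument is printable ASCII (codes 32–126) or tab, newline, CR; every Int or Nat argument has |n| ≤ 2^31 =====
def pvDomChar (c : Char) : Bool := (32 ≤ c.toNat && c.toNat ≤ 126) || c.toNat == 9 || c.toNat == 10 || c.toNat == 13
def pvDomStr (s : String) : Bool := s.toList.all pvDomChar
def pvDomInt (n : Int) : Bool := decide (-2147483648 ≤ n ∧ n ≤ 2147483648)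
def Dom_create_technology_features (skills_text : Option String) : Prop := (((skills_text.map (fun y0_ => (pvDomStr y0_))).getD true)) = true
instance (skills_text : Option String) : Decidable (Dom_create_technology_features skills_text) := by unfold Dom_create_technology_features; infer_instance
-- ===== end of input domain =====

-- B replaces A's six independent any(kw in s) substring scans by a single left-to-right
-- scan of the text that prefix-matches all keywords at each position, collecting matched
-- flags in a set (alternative algorithm; same cost).

-- ===== PORT A =====
def create_technology_features (skills_text : Option String) : List (String × Int) :=
  let skills_lower := PySem.Str.lower (skills_text.getD "")
  let big_data_keywords := ["hadoop", "spark", "kafka", "airflow", "databricks", "hive"]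
  let ml_keywords := ["tensorflow", "pytorch", "keras", "scikit", "sklearn", "xgboost"]
  let db_keywords := ["sql", "postgres", "mysql", "oracle", "mongodb", "cassandra", "redis"]
  let programming_keywords := ["python", "java", "scala", "r", "go", "rust", "javascript"]
  let bi_keywords := ["tableau", "power_bi", "looker", "qlik", "cognos", "microstrategy"]
  let cloud_keywords := ["aws", "azure", "gcp", "cloud"]
  [("has_bigdata", if big_data_keywords.any (fun kw => PySem.Str.isIn kw skills_lower) then (1 : Int) else 0),
   ("has_ml_lib", if ml_keywords.any (fun kw => PySem.Str.isIn kw skills_lower) then (1 : Int) else 0),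
   ("has_db", if db_keywords.any (fun kw => PySem.Str.isIn kw skills_lower) then (1 : Int) else 0),
   ("has_programming", if programming_keywords.any (fun kw => PySem.Str.isIn kw skills_lower) then (1 : Int) else 0),
   ("has_bi_tool", if bi_keywords.any (fun kw => PySem.Str.isIn kw skills_lower) then (1 : Int) else 0),
   ("has_cloud", if cloud_keywords.any (fun kw => PySem.Str.isIn kw skills_lower) then (1 : Int) else 0)]

-- ===== PORT B =====
def tfKeywords : List (String × String) :=
  [("hadoop", "has_bigdata"), ("spark", "has_bigdata"), ("kafka", "has_bigdata"),
   ("airflow", "has_bigdata"), ("databricks", "has_bigdata"), ("hive", "has_bigdata"),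
   ("tensorflow", "has_ml_lib"), ("pytorch", "has_ml_lib"), ("keras", "has_ml_lib"),
   ("scikit", "has_ml_lib"), ("sklearn", "has_ml_lib"), ("xgboost", "has_ml_lib"),
   ("sql", "has_db"), ("postgres", "has_db"), ("mysql", "has_db"), ("oracle", "has_db"),
   ("mongodb", "has_db"), ("cassandra", "has_db"), ("redis", "has_db"),
   ("python", "has_programming"), ("java", "has_programming"), ("scala", "has_programming"),
   ("r", "has_programming"), ("go", "has_programming"), ("rust", "has_programming"),
   ("javascript", "has_programming"),
   ("tableau", "has_bi_tool"), ("power_bi", "has_bi_tool"), ("looker", "has_bi_tool"),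
   ("qlik", "has_bi_tool"), ("cognos", "has_bi_tool"), ("microstrategy", "has_bi_tool"),
   ("aws", "has_cloud"), ("azure", "has_cloud"), ("gcp", "has_cloud"), ("cloud", "has_cloud")]

def tfFlags : List String :=
  ["has_bigdata", "has_ml_lib", "has_db", "has_programming", "has_bi_tool", "has_cloud"]

def create_technology_features_alt (skills_text : Option String) : List (String × Int) :=
  let cs := (PySem.Str.lower (skills_text.getD "")).toList
  -- s.startswith(kw, i) is exactly: kw.toList is a prefix of cs.drop i (0 ≤ i ≤ len)
  let matched : PySem.Set String :=
    (PySem.List.pyRange 0 (cs.length : Int) 1).foldl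
      (fun m i =>
        tfKeywords.foldl
          (fun m kf => if PySem.Chars.startswith (cs.drop i.toNat) kf.1.toList then m.add kf.2 else m)
          m)
      PySem.Set.empty
  tfFlags.map (fun flag => (flag, if matched.contains flag then (1 : Int) else 0))

-- ===== PRECONDITION & SPEC =====
def Spec_create_technology_features (skills_text : Option String) (out : List (String × Int)) : Prop := out = create_technology_features_alt skills_text
instance (skills_text : Option String) (out : List (String × Int)) : Decidable (Spec_create_technology_features skills_text out) := by unfold Spec_create_technology_features; infer_instance

-- ===== CLAIM (what is proved, stated in full; the proofs are below) =====
def Claim_equal_create_technology_features : Prop := ∀ (skills_text : Option String), Dom_create_technology_features skills_text → Spec_create_technology_features skills_text (create_technology_features skills_text)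

-- ===== LEMMAS AND PROOFS =====

-- the inner keyword loop: membership in the accumulated set, as a Bool
theorem tf_inner_contains (q : String × String → Bool) (f : String) :
    ∀ (L : List (String × String)) (m : PySem.Set String),
      (L.foldl (fun m kf => if q kf then m.add kf.2 else m) m).contains f
        = (m.contains f || L.any (fun kf => q kf && kf.2 == f)) := by
  intro L
  induction L with
  | nil => intro m; simp
  | cons kf L ih =>
      intro m
      rw [List.foldl_cons, ih]
      by_cases hq : q kf = true
      · rw [Bool.eq_iff_iff]
        simp only [hq, if_true, Bool.or_eq_true, List.any_cons, Bool.and_eq_true, beq_iff_eq,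
          PySem.Set.contains_iff, PySem.Set.mem_add]
        tauto
      · simp [eq_false_of_ne_true hq]

-- the outer position loop
theorem tf_outer_contains (q : Int → String × String → Bool) (f : String) :
    ∀ (R : List Int) (m : PySem.Set String),
      (R.foldl (fun m i => tfKeywords.foldl (fun m kf => if q i kf then m.add kf.2 else m) m) m).contains f
        = (m.contains f || R.any (fun i => tfKeywords.any (fun kf => q i kf && kf.2 == f))) := by
  intro R
  induction R with
  | nil => intro m; simp
  | cons i R ih =>
      intro m
      rw [List.foldl_cons, ih, tf_inner_contains]
      simp [Bool.or_comm, Bool.or_left_comm]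

-- substring containment is exactly: some scanned position carries a prefix match
theorem tf_isIn_iff (kw cs : List Char) (hkw : kw ≠ []) :
    PySem.Chars.isIn kw cs = true
      ↔ ∃ i ∈ PySem.List.pyRange 0 (cs.length : Int) 1,
          PySem.Chars.startswith (cs.drop i.toNat) kw = true := by
  simp only [PySem.List.mem_pyRange_one, PySem.Chars.startswith_iff]
  constructor
  · intro h
    obtain ⟨j, hp⟩ := (PySem.Chars.exists_prefix_drop_iff_isIn kw cs).2 h
    have hj : j < cs.length := by
      by_contra hge
      have hnil : cs.drop j = [] := List.drop_eq_nil_of_le (by omega)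
      rw [hnil] at hp
      exact hkw (List.prefix_nil.1 hp)
    exact ⟨(j : Int), ⟨by positivity, by exact_mod_cast hj⟩, by simpa using hp⟩
  · rintro ⟨i, _, hp⟩
    exact (PySem.Chars.exists_prefix_drop_iff_isIn kw cs).1 ⟨i.toNat, hp⟩

-- the position-major double scan, restricted to one flag, is the flag's keyword scan
theorem tf_positions_eq_filter (KW : List (String × String)) (f : String) (cs : List Char)
    (h : ∀ kf ∈ KW, kf.1.toList ≠ []) :
    (PySem.List.pyRange 0 (cs.length : Int) 1).any
        (fun i => KW.any (fun kf => PySem.Chars.startswith (cs.drop i.toNat) kf.1.toList && kf.2 == f))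
      = (KW.filter (fun kf => kf.2 == f)).any (fun kf => PySem.Chars.isIn kf.1.toList cs) := by
  rw [Bool.eq_iff_iff]
  simp only [List.any_eq_true, List.mem_filter, Bool.and_eq_true, beq_iff_eq]
  constructor
  · rintro ⟨i, hi, kf, hkf, hsw, hf⟩
    exact ⟨kf, ⟨hkf, hf⟩, (tf_isIn_iff kf.1.toList cs (h kf hkf)).2 ⟨i, hi, hsw⟩⟩
  · rintro ⟨kf, ⟨hkf, hf⟩, hin⟩
    obtain ⟨i, hi, hsw⟩ := (tf_isIn_iff kf.1.toList cs (h kf hkf)).1 hin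
    exact ⟨i, hi, kf, hkf, hsw, hf⟩

theorem tf_keywords_nonempty : ∀ kf ∈ tfKeywords, kf.1.toList ≠ [] := by decide

theorem tf_alt_eq (st : Option String) :
    create_technology_features_alt st = create_technology_features st := by
  unfold create_technology_features_alt create_technology_features
  simp only [tfFlags, List.map_cons, List.map_nil]
  rw [tf_outer_contains, tf_outer_contains, tf_outer_contains,
      tf_outer_contains, tf_outer_contains, tf_outer_contains]
  rw [tf_positions_eq_filter _ _ _ tf_keywords_nonempty,
      tf_positions_eq_filter _ _ _ tf_keywords_nonempty,
      tf_positions_eq_filter _ _ _ tf_keywords_nonempty,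
      tf_positions_eq_filter _ _ _ tf_keywords_nonempty,
      tf_positions_eq_filter _ _ _ tf_keywords_nonempty,
      tf_positions_eq_filter _ _ _ tf_keywords_nonempty]
  simp [tfKeywords, PySem.Set.empty]

-- ===== VERDICT (by name: the statement is the Claim_ definition above) =====
theorem create_technology_features_spec : Claim_equal_create_technology_features := by
  intro st _
  unfold Spec_create_technology_features
  exact (tf_alt_eq st).symm
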